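-- pv_equiv track=rewrite | github.com/tanaylab/sns_paper | borzoi/code/src/training_utils.py | get_metric_direction
-- ===== SOURCE A (Python) =====
-- METRIC_DIRECTIONS = {
--     'val_loss': 'min',
--     'val_mse': 'min',
--     'val_pearson': 'max',
--     'val_genome_wide_pearson': 'max',
--     'val_ppv': 'max',
--     'val_sensitivity': 'max',
--     'val_iou': 'max',
--     'val_precision': 'max',
--     'val_recall': 'max',
--     'val_f1': 'max',
--     'val_auprc': 'max',
--     'val_r2': 'max',
-- }
--
-- def get_metric_direction(metric_name: str) -> str:
--     """Return 'min' or 'max' for the given metric.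
--
--     Args:
--         metric_name: Name of the metric (with or without 'val_' prefix).
--
--     Returns:
--         'min' for metrics that should be minimized (loss, mse),
--         'max' for metrics that should be maximized (correlation, ppv).
--     """
--     normalized = metric_name if metric_name.startswith('val_') else f'val_{metric_name}'
--     if normalized in METRIC_DIRECTIONS:
--         return METRIC_DIRECTIONS[normalized]
--
--     # Support suffixed metrics like val_iou_atac or val_genome_wide_pearson_subset.
--     # Longest keys first so specific base metrics (e.g. genome_wide_pearson) win.
--     for base_metric in sorted(METRIC_DIRECTIONS.keys(), key=len, reverse=True):
--         if normalized.startswith(f"{base_metric}_"):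
--             return METRIC_DIRECTIONS[base_metric]
--
--     return 'min'  # Default to min for unknown
-- ===== SOURCE B (Python) =====
-- METRIC_DIRECTIONS = {
--     'val_loss': 'min',
--     'val_mse': 'min',
--     'val_pearson': 'max',
--     'val_genome_wide_pearson': 'max',
--     'val_ppv': 'max',
--     'val_sensitivity': 'max',
--     'val_iou': 'max',
--     'val_precision': 'max',
--     'val_recall': 'max',
--     'val_f1': 'max',
--     'val_auprc': 'max',
--     'val_r2': 'max',
-- }
--
-- def get_metric_direction(metric_name: str) -> str:
--     """Return 'min' or 'max' for the given metric.
--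
--     Instead of scanning the key set, walk the normalized name itself from the
--     right: the longest base-metric match is exactly the rightmost underscore
--     cut point whose prefix is a known metric (keys are pairwise
--     prefix-incomparable, so this agrees with longest-key-first).
--     """
--     normalized = metric_name if metric_name.startswith('val_') else f'val_{metric_name}'
--     if normalized in METRIC_DIRECTIONS:
--         return METRIC_DIRECTIONS[normalized]
--     for i in range(len(normalized) - 1, -1, -1):
--         if normalized[i] == '_' and normalized[:i] in METRIC_DIRECTIONS:
--             return METRIC_DIRECTIONS[normalized[:i]]
--     return 'min'
-- ===== Notes on version B (the rewrite author's own statement) =====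
-- stated objective: alternative
-- what changed: The fallback no longer sorts the dict keys by length and scans them for a prefix match; it walks the normalized name itself right-to-left over its underscore cut points and returns the direction of the first (i.e. longest) prefix that is a known metric key, which agrees with A because the keys are pairwise prefix-incomparable.
import Mathlib
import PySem

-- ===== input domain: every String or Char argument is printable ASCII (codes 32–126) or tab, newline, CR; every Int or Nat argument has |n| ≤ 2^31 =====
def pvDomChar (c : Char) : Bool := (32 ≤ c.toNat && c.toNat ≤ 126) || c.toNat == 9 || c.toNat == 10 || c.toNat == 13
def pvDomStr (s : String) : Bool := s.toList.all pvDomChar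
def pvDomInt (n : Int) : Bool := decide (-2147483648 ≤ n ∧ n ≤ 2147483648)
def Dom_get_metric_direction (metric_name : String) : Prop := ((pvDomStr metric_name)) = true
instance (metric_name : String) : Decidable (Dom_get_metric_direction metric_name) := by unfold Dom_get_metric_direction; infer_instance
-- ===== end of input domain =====

-- B's fallback walks the normalized name right-to-left over its underscore cut points
-- (one dict lookup per position) instead of sorting the key set by length and scanning
-- it for a prefix match (objective: alternative algorithm of similar cost).

-- ===== PORT A =====
def METRIC_DIRECTIONS : PySem.Dict String String := PySem.Dict.ofList
  [("val_loss", "min"), ("val_mse", "min"), ("val_pearson", "max"),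
   ("val_genome_wide_pearson", "max"), ("val_ppv", "max"), ("val_sensitivity", "max"),
   ("val_iou", "max"), ("val_precision", "max"), ("val_recall", "max"),
   ("val_f1", "max"), ("val_auprc", "max"), ("val_r2", "max")]

def get_metric_direction (metric_name : String) : String :=
  let normalized := if PySem.Str.startswith metric_name "val_" then metric_name else "val_" ++ metric_name
  if METRIC_DIRECTIONS.contains normalized then
    -- the key is present here, so Python's dict[...] is exactly getD (no KeyError possible)
    METRIC_DIRECTIONS.getD normalized "min"
  else
    -- 'for base in sorted(keys, key=len, reverse=True): if startswith: return' = find? over the sorted list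
    match (PySem.List.sorted METRIC_DIRECTIONS.keys (fun k => PySem.Str.len k) true).find?
        (fun base => PySem.Str.startswith normalized (base ++ "_")) with
    | some base => METRIC_DIRECTIONS.getD base "min"
    | none => "min"

-- ===== PORT B =====
def get_metric_direction_alt (metric_name : String) : String :=
  let normalized := if PySem.Str.startswith metric_name "val_" then metric_name else "val_" ++ metric_name
  if METRIC_DIRECTIONS.contains normalized then
    METRIC_DIRECTIONS.getD normalized "min"
  else
    -- 'for i in range(len(normalized)-1, -1, -1): if normalized[i]=='_' and normalized[:i] in d: return d[normalized[:i]]'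
    -- = find? over the descending range; every i in the range is in bounds, so normalized[i] is pyGet? = some _
    match (PySem.List.pyRange (PySem.Str.len normalized - 1) (-1) (-1)).find?
        (fun i => (PySem.Str.pyGet? normalized i == some '_') &&
                  METRIC_DIRECTIONS.contains (PySem.Str.slice normalized none (some i))) with
    | some i => METRIC_DIRECTIONS.getD (PySem.Str.slice normalized none (some i)) "min"
    | none => "min"

-- ===== PRECONDITION & SPEC =====
def Spec_get_metric_direction (metric_name : String) (out : String) : Prop := out = get_metric_direction_alt metric_name
instance (metric_name : String) (out : String) : Decidable (Spec_get_metric_direction metric_name out) := by unfold Spec_get_metric_direction; infer_instance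

-- ===== CLAIM (what is proved, stated in full; the proofs are below) =====
def Claim_equal_get_metric_direction : Prop := ∀ (metric_name : String), Dom_get_metric_direction metric_name → Spec_get_metric_direction metric_name (get_metric_direction metric_name)

-- ===== LEMMAS AND PROOFS =====

-- the 12 keys (with '_' appended) are pairwise prefix-incomparable
theorem pv_keys_incomp :
    METRIC_DIRECTIONS.keys.Pairwise (fun a b =>
      ¬((a ++ "_").toList <+: (b ++ "_").toList) ∧ ¬((b ++ "_").toList <+: (a ++ "_").toList)) := by
  decide

-- hence, for any target string, at most one key can match
theorem pv_excl (n : String) :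
    METRIC_DIRECTIONS.keys.Pairwise (fun a b =>
      ¬(PySem.Str.startswith n (a ++ "_") = true ∧ PySem.Str.startswith n (b ++ "_") = true)) := by
  refine pv_keys_incomp.imp ?_
  intro a b hab hp
  rcases hab with ⟨h1, h2⟩
  rcases hp with ⟨pa, pb⟩
  have ha : (a ++ "_").toList <+: n.toList := by
    have := pa; simp only [PySem.Str.startswith_eq] at this
    exact (PySem.Chars.startswith_iff _ _).mp this
  have hb : (b ++ "_").toList <+: n.toList := by
    have := pb; simp only [PySem.Str.startswith_eq] at this
    exact (PySem.Chars.startswith_iff _ _).mp this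
  rcases List.prefix_or_prefix_of_prefix ha hb with h | h
  · exact h1 h
  · exact h2 h

-- two matching keys are the same key
theorem pv_unique (n a b : String)
    (ha : a ∈ METRIC_DIRECTIONS.keys) (hb : b ∈ METRIC_DIRECTIONS.keys)
    (pa : PySem.Str.startswith n (a ++ "_") = true)
    (pb : PySem.Str.startswith n (b ++ "_") = true) : a = b := by
  by_contra hne
  exact (pv_excl n).forall (fun x y h ⟨u, v⟩ => h ⟨v, u⟩) ha hb hne ⟨pa, pb⟩

-- B's loop condition at i yields A's matching key normalized[:i]
theorem pv_q_to_p (n : String) (i : Int) (hi : 0 ≤ i)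
    (hg : PySem.Str.pyGet? n i = some '_')
    (hc : METRIC_DIRECTIONS.contains (PySem.Str.slice n none (some i)) = true) :
    (PySem.Str.slice n none (some i)) ∈ METRIC_DIRECTIONS.keys ∧
    PySem.Str.startswith n ((PySem.Str.slice n none (some i)) ++ "_") = true := by
  refine ⟨(PySem.Dict.contains_iff_mem_keys _ _).mp hc, ?_⟩
  have hsl : (PySem.Str.slice n none (some i)).toList = n.toList.take i.toNat := by
    rw [PySem.Str.toList_slice, PySem.Chars.slice_eq_listSlice, PySem.List.slice_to _ hi]
  have hg' : n.toList[i.toNat]? = some '_' := by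
    have := hg
    simp only [PySem.Str.pyGet?_eq, PySem.Chars.pyGet?_eq_listPyGet?,
      PySem.List.pyGet?_of_nonneg _ hi] at this
    exact this
  have hlt : i.toNat < n.toList.length := by
    have := List.getElem?_eq_some_iff.mp hg'
    exact this.1
  simp only [PySem.Str.startswith_eq, String.toList_append, hsl]
  rw [PySem.Chars.startswith_iff]
  have : n.toList.take i.toNat ++ ['_'] = n.toList.take (i.toNat + 1) := by
    rw [List.take_add_one, hg']
    rfl
  rw [show ("_" : String).toList = ['_'] from rfl, this]
  exact List.take_prefix _ _

-- A's matching key k makes B's loop condition true at i = len(k)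
theorem pv_p_to_q (n k : String)
    (pk : PySem.Str.startswith n (k ++ "_") = true) :
    PySem.Str.pyGet? n (k.toList.length : Int) = some '_' ∧
    PySem.Str.slice n none (some (k.toList.length : Int)) = k ∧
    (k.toList.length : Int) < n.toList.length := by
  have hpre : (k.toList ++ ['_']) <+: n.toList := by
    have := pk
    simp only [PySem.Str.startswith_eq, String.toList_append] at this
    exact (PySem.Chars.startswith_iff _ _).mp this
  obtain ⟨t, ht⟩ := hpre
  have hn : n.toList = k.toList ++ '_' :: t := by rw [← ht]; simp
  refine ⟨?_, ?_, ?_⟩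
  · simp only [PySem.Str.pyGet?_eq, PySem.Chars.pyGet?_eq_listPyGet?, hn]
    exact PySem.List.pyGet?_append_length _ _ _
  · apply String.toList_inj.mp
    rw [PySem.Str.toList_slice, PySem.Chars.slice_eq_listSlice,
      PySem.List.slice_to _ (by positivity), Int.toNat_natCast, hn, List.take_left]
  · rw [hn]; simp

-- the two fallback scans agree
theorem pv_main (metric_name : String) :
    get_metric_direction metric_name = get_metric_direction_alt metric_name := by
  unfold get_metric_direction get_metric_direction_alt
  set n := if PySem.Str.startswith metric_name "val_" then metric_name else "val_" ++ metric_name with hn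
  by_cases hc : METRIC_DIRECTIONS.contains n
  · simp [hc]
  · simp only [hc, Bool.false_eq_true, if_false]
    set p := fun base => PySem.Str.startswith n (base ++ "_") with hp
    set q := fun (i : Int) => (PySem.Str.pyGet? n i == some '_') &&
      METRIC_DIRECTIONS.contains (PySem.Str.slice n none (some i)) with hq
    have hrange : ∀ i : Int, i ∈ PySem.List.pyRange (PySem.Str.len n - 1) (-1) (-1) ↔
        0 ≤ i ∧ i < n.toList.length := by
      intro i
      rw [PySem.List.mem_pyRange_neg_one]
      simp only [PySem.Str.len_eq]
      omega
    cases hF : (PySem.List.sorted METRIC_DIRECTIONS.keys (fun k => PySem.Str.len k) true).find? p with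
    | some k =>
      have hkmem : k ∈ METRIC_DIRECTIONS.keys :=
        (PySem.List.sorted_perm _ _ _).mem_iff.mp (List.mem_of_find?_eq_some hF)
      have hpk : p k = true := List.find?_some hF
      obtain ⟨hg, hsl, hlt⟩ := pv_p_to_q n k hpk
      -- B's find? cannot be none: i = len(k) is in the range and satisfies q
      cases hG : (PySem.List.pyRange (PySem.Str.len n - 1) (-1) (-1)).find? q with
      | none =>
        exfalso
        have := List.find?_eq_none.mp hG (k.toList.length : Int)
          ((hrange _).mpr ⟨by positivity, hlt⟩)
        apply this
        simp only [hq, hg, hsl, beq_self_eq_true, Bool.true_and]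
        exact (PySem.Dict.contains_iff_mem_keys _ _).mpr hkmem
      | some i =>
        have hqi : q i = true := List.find?_some hG
        have hi0 : 0 ≤ i := ((hrange _).mp (List.mem_of_find?_eq_some hG)).1
        have hqi' := hqi
        simp only [hq, Bool.and_eq_true, beq_iff_eq] at hqi'
        obtain ⟨hmem, hpm⟩ := pv_q_to_p n i hi0 hqi'.1 hqi'.2
        have : PySem.Str.slice n none (some i) = k := pv_unique n _ k hmem hkmem hpm hpk
        simp only [this]
    | none =>
      -- no key matches, so no range position can satisfy q
      have hnone : ∀ x ∈ PySem.List.sorted METRIC_DIRECTIONS.keys (fun k => PySem.Str.len k) true,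
          ¬ p x = true := List.find?_eq_none.mp hF
      cases hG : (PySem.List.pyRange (PySem.Str.len n - 1) (-1) (-1)).find? q with
      | some i =>
        exfalso
        have hqi := List.find?_some hG
        have hi0 : 0 ≤ i := ((hrange _).mp (List.mem_of_find?_eq_some hG)).1
        simp only [hq, Bool.and_eq_true, beq_iff_eq] at hqi
        obtain ⟨hmem, hpm⟩ := pv_q_to_p n i hi0 hqi.1 hqi.2
        exact hnone _ ((PySem.List.sorted_perm _ _ _).mem_iff.mpr hmem) hpm
      | none => rfl

-- ===== VERDICT (by name: the statement is the Claim_ definition above) =====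
theorem get_metric_direction_spec : Claim_equal_get_metric_direction := by
  intro metric_name _
  unfold Spec_get_metric_direction
  exact pv_main metric_name
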